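-- pv_equiv track=rewrite | github.com/SumitGore/Code | server_management.py | getMaxRequests
-- ===== SOURCE A (Python) =====
-- def getMaxRequests(serverCapacity, incomingRequests, k):
--     n = len(serverCapacity)
--     gains = []
--     normal_handled = []
--
--     # Step 1: Calculate gains for each server
--     for i in range(n):
--         normal = min(serverCapacity[i], incomingRequests[i])
--         doubled = min(serverCapacity[i] * 2, incomingRequests[i])
--         gain = doubled - normal
--         gains.append((gain, i))
--         normal_handled.append(normal)
--
--     # Step 2: Pick k largest gains
--     gains.sort(reverse=True)
--     doubled_indices = set()
--     for idx in range(k):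
--         if idx < n:  # Make sure k is not greater than number of servers
--             doubled_indices.add(gains[idx][1])
--
--     # Step 3: Compute total
--     total = 0
--     for i in range(n):
--         if i in doubled_indices:
--             total += min(serverCapacity[i]*2, incomingRequests[i])
--         else:
--             total += min(serverCapacity[i], incomingRequests[i])
--
--     return total
-- ===== SOURCE B (Python) =====
-- def getMaxRequests(serverCapacity, incomingRequests, k):
--     total = 0
--     gains = []
--     for c, r in zip(serverCapacity, incomingRequests):
--         total += min(c, r)
--         gains.append(min(2 * c, r) - min(c, r))
--     return total + _top_k_sum(gains, k)
--
--
-- def _top_k_sum(lst, kk):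
--     # quickselect-style partial selection: sum of the kk largest values,
--     # by iterative three-way partition around a median-of-three pivot.
--     acc = 0
--     while True:
--         if kk <= 0 or not lst:
--             return acc
--         if kk >= len(lst):
--             return acc + sum(lst)
--         a, b, c = lst[0], lst[len(lst) // 2], lst[-1]
--         pivot = a + b + c - min(a, b, c) - max(a, b, c)  # median of three
--         hi = [x for x in lst if x > pivot]
--         if kk <= len(hi):
--             lst = hi
--             continue
--         eq_count = lst.count(pivot)
--         if kk <= len(hi) + eq_count:
--             return acc + sum(hi) + (kk - len(hi)) * pivot
--         acc += sum(hi) + eq_count * pivot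
--         kk -= len(hi) + eq_count
--         lst = [x for x in lst if x < pivot]
-- ===== Notes on version B (the rewrite author's own statement) =====
-- stated objective: alternative
-- what changed: B replaces A's full descending sort of (gain,index) pairs plus index-set membership pass by one accumulation pass over zip and an iterative quickselect-style three-way partition (median-of-three pivot) that sums only the k largest gains; correct because the total depends only on the multiset of the k largest gain values, not on which tied index is chosen.
import Mathlib
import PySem

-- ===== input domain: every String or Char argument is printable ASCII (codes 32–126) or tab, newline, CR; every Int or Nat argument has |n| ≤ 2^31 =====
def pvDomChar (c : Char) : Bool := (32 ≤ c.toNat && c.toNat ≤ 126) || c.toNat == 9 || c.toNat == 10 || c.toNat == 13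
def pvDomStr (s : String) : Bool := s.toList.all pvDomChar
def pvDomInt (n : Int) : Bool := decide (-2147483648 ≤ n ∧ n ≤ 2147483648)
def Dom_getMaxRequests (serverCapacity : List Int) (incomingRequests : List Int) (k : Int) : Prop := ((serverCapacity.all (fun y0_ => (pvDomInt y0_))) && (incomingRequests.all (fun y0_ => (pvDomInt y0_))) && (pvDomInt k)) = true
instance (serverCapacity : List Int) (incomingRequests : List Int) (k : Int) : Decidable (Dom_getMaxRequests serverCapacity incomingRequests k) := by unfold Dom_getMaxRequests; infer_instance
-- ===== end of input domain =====

-- B drops A's sort of (gain,index) pairs and the index-set pass: one accumulation pass over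
-- zip, then an iterative quickselect-style partition summing only the k largest gains (objective: alternative).
-- ===== PORT A =====
def getMaxRequests (serverCapacity : List Int) (incomingRequests : List Int) (k : Int) : Int :=
  let n : Int := PySem.List.len serverCapacity
  -- step 1: build gains (list of (gain, i)) and normal_handled in one loop over range(n)
  let st :=
    (PySem.List.pyRange 0 n).foldl
      (fun (acc : List (Int × Int) × List Int) i =>
        let normal := min (PySem.List.pyGetD serverCapacity i 0) (PySem.List.pyGetD incomingRequests i 0)
        let doubled := min (PySem.List.pyGetD serverCapacity i 0 * 2) (PySem.List.pyGetD incomingRequests i 0)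
        let gain := doubled - normal
        (acc.1 ++ [(gain, i)], acc.2 ++ [normal]))
      ([], [])
  -- step 2: gains.sort(reverse=True) on tuples, then pick k largest
  let gains := PySem.List.sorted2 st.1 (fun p => p.1) (fun p => p.2) true
  let doubledIndices :=
    (PySem.List.pyRange 0 k).foldl
      (fun (s : PySem.Set Int) idx =>
        if idx < n then PySem.Set.add s (PySem.List.pyGetD gains idx (0, 0)).2 else s)
      PySem.Set.empty
  -- step 3: total
  (PySem.List.pyRange 0 n).foldl
    (fun total i =>
      if PySem.Set.contains doubledIndices i then
        total + min (PySem.List.pyGetD serverCapacity i 0 * 2) (PySem.List.pyGetD incomingRequests i 0)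
      else
        total + min (PySem.List.pyGetD serverCapacity i 0) (PySem.List.pyGetD incomingRequests i 0))
    0

-- ===== PORT B =====
-- quickselect-style partial selection (Source B's _top_k_sum): sum of the kk largest values of lst
-- median of three: lst[0], lst[len(lst)//2], lst[-1]  (Source B's pivot expression)
def med3 (lst : List Int) : Int :=
  PySem.List.pyGetD lst 0 0
    + PySem.List.pyGetD lst (PySem.Int.floordiv (PySem.List.len lst) 2) 0
    + PySem.List.pyGetD lst (-1) 0
    - min (min (PySem.List.pyGetD lst 0 0)
        (PySem.List.pyGetD lst (PySem.Int.floordiv (PySem.List.len lst) 2) 0))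
        (PySem.List.pyGetD lst (-1) 0)
    - max (max (PySem.List.pyGetD lst 0 0)
        (PySem.List.pyGetD lst (PySem.Int.floordiv (PySem.List.len lst) 2) 0))
        (PySem.List.pyGetD lst (-1) 0)

-- Source B's _top_k_sum loop, fuel = initial list length (the loop shortens lst every iteration,
-- so the fuel branch is never reached)
def topKSumGo : Nat → List Int → Int → Int → Int
  | 0, _, _, acc => acc
  | fuel + 1, lst, kk, acc =>
    if kk ≤ 0 ∨ lst.length = 0 then acc
    else if (lst.length : Int) ≤ kk then acc + lst.sum
    else if kk ≤ ((lst.filter (fun x => decide (med3 lst < x))).length : Int) then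
      topKSumGo fuel (lst.filter (fun x => decide (med3 lst < x))) kk acc
    else if kk ≤ ((lst.filter (fun x => decide (med3 lst < x))).length : Int)
        + PySem.List.count lst (med3 lst) then
      acc + (lst.filter (fun x => decide (med3 lst < x))).sum
        + (kk - (lst.filter (fun x => decide (med3 lst < x))).length) * med3 lst
    else
      topKSumGo fuel (lst.filter (fun x => decide (x < med3 lst)))
        (kk - (lst.filter (fun x => decide (med3 lst < x))).length
           - PySem.List.count lst (med3 lst))
        (acc + (lst.filter (fun x => decide (med3 lst < x))).sum
           + PySem.List.count lst (med3 lst) * med3 lst)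

def topKSum (lst : List Int) (kk : Int) : Int := topKSumGo lst.length lst kk 0

-- (port B follows Source B: one fold over zip accumulating the normal total and the gain list,
--  then topKSum for the k largest gains)
def getMaxRequests_alt (serverCapacity : List Int) (incomingRequests : List Int) (k : Int) : Int :=
  let st := (serverCapacity.zip incomingRequests).foldl
      (fun (acc : Int × List Int) p =>
        (acc.1 + min p.1 p.2, acc.2 ++ [min (2 * p.1) p.2 - min p.1 p.2]))
      (0, [])
  st.1 + topKSum st.2 k

-- ===== PRECONDITION & SPEC =====
-- Pre_ excludes exactly the inputs where A raises IndexError: incomingRequests shorter than serverCapacity.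
def Pre_getMaxRequests (serverCapacity : List Int) (incomingRequests : List Int) (k : Int) : Prop :=
  serverCapacity.length ≤ incomingRequests.length
instance (serverCapacity : List Int) (incomingRequests : List Int) (k : Int) : Decidable (Pre_getMaxRequests serverCapacity incomingRequests k) := by unfold Pre_getMaxRequests; infer_instance

def pvWitness_getMaxRequests : List Int × List Int × Int := ([3, 1, 2], [5, 2, 2], 2)

def Spec_getMaxRequests (serverCapacity : List Int) (incomingRequests : List Int) (k : Int) (out : Int) : Prop := out = getMaxRequests_alt serverCapacity incomingRequests k
instance (serverCapacity : List Int) (incomingRequests : List Int) (k : Int) (out : Int) : Decidable (Spec_getMaxRequests serverCapacity incomingRequests k out) := by unfold Spec_getMaxRequests; infer_instance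

-- ===== CLAIM (what is proved, stated in full; the proofs are below) =====
def Claim_equal_getMaxRequests : Prop := ∀ (serverCapacity : List Int) (incomingRequests : List Int) (k : Int), Dom_getMaxRequests serverCapacity incomingRequests k → Pre_getMaxRequests serverCapacity incomingRequests k → Spec_getMaxRequests serverCapacity incomingRequests k (getMaxRequests serverCapacity incomingRequests k)
-- ===== LEMMAS AND PROOFS =====
-- generic: an insertBy fold produces a list pairwise-ordered by "not before-swapped"
theorem pairwise_insertBy_pv {α : Type} (before : α → α → Bool)
    (hasym : ∀ a b, before a b = true → before b a = false)
    (htrans : ∀ a b c, before b a = false → before c b = false → before c a = false)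
    (x : α) : ∀ (ys : List α), ys.Pairwise (fun a b => before b a = false) →
      (PySem.List.insertBy before x ys).Pairwise (fun a b => before b a = false) := by
  intro ys
  induction ys with
  | nil => intro _; simp [PySem.List.insertBy]
  | cons y ys ih =>
    intro hp
    rw [List.pairwise_cons] at hp
    obtain ⟨h1, h2⟩ := hp
    by_cases hb : before x y = true
    · simp only [PySem.List.insertBy, hb, if_true]
      refine List.Pairwise.cons ?_ (List.Pairwise.cons h1 h2)
      intro z hz
      rw [List.mem_cons] at hz
      rcases hz with rfl | hz
      · exact hasym _ _ hb
      · exact htrans _ _ _ (hasym _ _ hb) (h1 z hz)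
    · simp only [PySem.List.insertBy, hb]
      refine List.Pairwise.cons ?_ (ih h2)
      intro z hz
      rcases (PySem.List.mem_insertBy before x z ys).mp hz with rfl | hz
      · simpa using hb
      · exact h1 z hz

theorem pairwise_foldl_insertBy_pv {α : Type} (before : α → α → Bool)
    (hasym : ∀ a b, before a b = true → before b a = false)
    (htrans : ∀ a b c, before b a = false → before c b = false → before c a = false)
    (xs : List α) :
    (xs.foldl (fun acc x => PySem.List.insertBy before x acc) []).Pairwise
      (fun a b => before b a = false) := by
  suffices h : ∀ acc, acc.Pairwise (fun a b => before b a = false) →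
      (xs.foldl (fun acc x => PySem.List.insertBy before x acc) acc).Pairwise
        (fun a b => before b a = false) from h [] (by simp)
  induction xs with
  | nil => intro acc h; simpa using h
  | cons x xs ih =>
    intro acc h
    exact ih _ (pairwise_insertBy_pv before hasym htrans x acc h)

-- sum of a map changes by f x - f' x when f and f' agree off a single element x of a nodup list
theorem sum_update_point_pv (l : List Int) (f f' : Int → Int) (x : Int)
    (hl : l.Nodup) (hx : x ∈ l) (hoff : ∀ i ∈ l, i ≠ x → f i = f' i) :
    (l.map f).sum = (l.map f').sum + (f x - f' x) := by
  induction l with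
  | nil => cases hx
  | cons y l ih =>
    rw [List.nodup_cons] at hl
    rw [List.mem_cons] at hx
    rcases hx with rfl | hx
    · have : l.map f = l.map f' := List.map_congr_left (fun i hi =>
        hoff i (List.mem_cons_of_mem _ hi) (fun h => hl.1 (h ▸ hi)))
      simp [this]; ring
    · have hy : f y = f' y := hoff y (List.mem_cons_self) (fun h => hl.1 (h ▸ hx))
      have := ih hl.2 hx (fun i hi hne => hoff i (List.mem_cons_of_mem _ hi) hne)
      simp [this, hy]; ring

-- sum over l of (if i ∈ S then g i else 0) = sum of g over S, for nodup S ⊆ nodup l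
theorem sum_map_ite_mem_pv (g : Int → Int) : ∀ (S l : List Int), l.Nodup → S.Nodup →
    (∀ x ∈ S, x ∈ l) →
    (l.map (fun i => if i ∈ S then g i else 0)).sum = (S.map g).sum := by
  intro S
  induction S with
  | nil => intro l _ _ _; simp
  | cons x S ih =>
    intro l hl hS hsub
    rw [List.nodup_cons] at hS
    have hx : x ∈ l := hsub x List.mem_cons_self
    have step := sum_update_point_pv l (fun i => if i ∈ x :: S then g i else 0)
      (fun i => if i ∈ S then g i else 0) x hl hx ?_
    · rw [step, ih l hl hS.2 (fun y hy => hsub y (List.mem_cons_of_mem _ hy))]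
      simp [hS.1]; ring
    · intro i _ hne
      simp [List.mem_cons, hne]

-- a loop over range(len(c)) reading c[i], r[i] is a map over zip(c, r)  (c no longer than r)
theorem map_pyRange_eq_map_zip_pv (c r : List Int) (f : Int → Int → Int)
    (h : c.length ≤ r.length) :
    (PySem.List.pyRange 0 (PySem.List.len c)).map
        (fun i => f (PySem.List.pyGetD c i 0) (PySem.List.pyGetD r i 0))
      = (c.zip r).map (fun p => f p.1 p.2) := by
  apply List.ext_getElem
  · simp [PySem.List.length_pyRange_one, PySem.List.len]
    omega
  · intro j h1 h2
    have hj : j < c.length := by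
      simpa [PySem.List.length_pyRange_one, PySem.List.len] using h1
    have hr : (PySem.List.pyRange 0 (PySem.List.len c))[j]'(by simpa using h1) = (j : Int) := by
      simpa using PySem.List.getElem_pyRange_one 0 (PySem.List.len c) j (by simpa using h1)
    simp only [List.getElem_map, hr, List.getElem_zip]
    rw [PySem.List.pyGetD_eq_getElem c 0 (by omega) (by exact_mod_cast hj),
        PySem.List.pyGetD_eq_getElem r 0 (by omega) (by exact_mod_cast (lt_of_lt_of_le hj h))]
    simp

-- reading P[idx] for idx ∈ range(m) is the take-m prefix (0 ≤ m ≤ len P)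
theorem map_pyRange_pyGetD_take_pv {α : Type} (P : List α) (m : Int) (d : α)
    (h1 : m ≤ P.length) :
    (PySem.List.pyRange 0 m).map (fun idx => PySem.List.pyGetD P idx d) = P.take m.toNat := by
  apply List.ext_getElem
  · simp [PySem.List.length_pyRange_one]
    omega
  · intro j hj1 hj2
    have hjm : (j : Int) < m := by
      simp [PySem.List.length_pyRange_one] at hj1; omega
    have hr : (PySem.List.pyRange 0 m)[j]'(by simpa using hj1) = (j : Int) := by
      simpa using PySem.List.getElem_pyRange_one 0 m j (by simpa using hj1)
    simp only [List.getElem_map, hr, List.getElem_take]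
    rw [PySem.List.pyGetD_eq_getElem P d (by omega) (by push_cast; omega)]
    simp

-- a pyGetD read with an in-range (possibly negative) index is an element of the list
theorem pyGetD_mem_pv (l : List Int) (i d : Int) (h1 : -l.length ≤ i) (h2 : i < l.length) :
    PySem.List.pyGetD l i d ∈ l := by
  obtain ⟨x, hx⟩ : ∃ x, PySem.List.pyGet? l i = some x := by
    cases hc : PySem.List.pyGet? l i with
    | none =>
      have := (PySem.List.pyGet?_eq_none_iff l i).mp hc
      exact absurd ⟨h1, h2⟩ this
    | some x => exact ⟨x, rfl⟩
  have hm := PySem.List.mem_of_pyGet?_eq_some l hx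
  simpa [PySem.List.pyGetD, hx] using hm

-- a + b + c minus min and max of the three is one of the three
theorem med3_cases_pv (a b c : Int) :
    a + b + c - min (min a b) c - max (max a b) c = a
    ∨ a + b + c - min (min a b) c - max (max a b) c = b
    ∨ a + b + c - min (min a b) c - max (max a b) c = c := by
  simp only [min_def, max_def]; split_ifs <;> omega

theorem med3_mem_pv (l : List Int) (hl : 1 ≤ l.length) : med3 l ∈ l := by
  have hfd : (0 : Int) ≤ PySem.Int.floordiv (PySem.List.len l) 2
      ∧ PySem.Int.floordiv (PySem.List.len l) 2 < l.length := by
    rw [PySem.Int.floordiv_eq_ediv_of_pos (by omega)]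
    show (0 : Int) ≤ (l.length : Int) / 2 ∧ (l.length : Int) / 2 < l.length
    omega
  have ha := pyGetD_mem_pv l 0 0 (by omega) (by omega)
  have hb := pyGetD_mem_pv l (PySem.Int.floordiv (PySem.List.len l) 2) 0
    (by omega) (by omega)
  have hc := pyGetD_mem_pv l (-1) 0 (by omega) (by omega)
  rcases med3_cases_pv (PySem.List.pyGetD l 0 0)
      (PySem.List.pyGetD l (PySem.Int.floordiv (PySem.List.len l) 2) 0)
      (PySem.List.pyGetD l (-1) 0) with h | h | h <;>
    · rw [med3, h]; assumption

theorem pairwise_replicate_ge_pv (n : Nat) (p : Int) :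
    (List.replicate n p).Pairwise (fun a b : Int => b ≤ a) := by
  induction n with
  | zero => simp
  | succ n ih =>
    rw [List.replicate_succ]
    exact List.Pairwise.cons (fun y hy => by rw [List.eq_of_mem_replicate hy]) ih

-- the descending sort splits around any pivot p into the >p part, count-p copies of p, the <p part
theorem sorted_rev_three_split_pv (p : Int) (l : List Int) :
    PySem.List.sorted l (fun x => x) true
      = PySem.List.sorted (l.filter (fun x => decide (p < x))) (fun x => x) true
        ++ List.replicate (l.count p) p
        ++ PySem.List.sorted (l.filter (fun x => decide (x < p))) (fun x => x) true := by
  apply List.Perm.eq_of_pairwise (le := fun a b : Int => b ≤ a)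
  · exact fun a b _ _ h1 h2 => le_antisymm h2 h1
  · exact PySem.List.sorted_pairwise_rev l (fun x => x)
  · rw [List.append_assoc, List.pairwise_append]
    refine ⟨PySem.List.sorted_pairwise_rev _ _, ?_, ?_⟩
    · rw [List.pairwise_append]
      refine ⟨pairwise_replicate_ge_pv _ _, PySem.List.sorted_pairwise_rev _ _, ?_⟩
      intro a ha b hb
      have ha' := List.eq_of_mem_replicate ha
      have hb' : b < p := by
        simpa using List.of_mem_filter ((PySem.List.mem_sorted _ _ _ _).mp hb)
      omega
    · intro a ha b hb
      have ha' : p < a := by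
        simpa using List.of_mem_filter ((PySem.List.mem_sorted _ _ _ _).mp ha)
      rcases List.mem_append.mp hb with hb | hb
      · have := List.eq_of_mem_replicate hb; omega
      · have : b < p := by
          simpa using List.of_mem_filter ((PySem.List.mem_sorted _ _ _ _).mp hb)
        omega
  · refine (PySem.List.sorted_perm _ _ _).trans ?_
    have h1 : l.Perm
        (l.filter (fun x => decide (p < x)) ++ l.filter (fun x => !decide (p < x))) :=
      (List.filter_append_perm _ l).symm
    have h2 : (l.filter (fun x => !decide (p < x))).Perm
        (List.replicate (l.count p) p ++ l.filter (fun x => decide (x < p))) := by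
      have h3 := (List.filter_append_perm (fun x => x == p)
        (l.filter (fun x => !decide (p < x)))).symm
      rw [List.filter_filter, List.filter_filter] at h3
      have he : l.filter (fun x => x == p && !decide (p < x))
          = List.replicate (List.count p l) p := by
        rw [List.filter_congr (q := fun x => x == p) ?_, List.filter_beq]
        intro x _
        by_cases h : x = p
        · subst h; simp
        · simp [h]
      have hlt : l.filter (fun x => !(x == p) && !decide (p < x))
          = l.filter (fun x => decide (x < p)) := by
        apply List.filter_congr
        intro x _
        by_cases h1 : p < x
        · simp [h1, show ¬ x < p by omega, show ¬ x = p by omega]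
        · by_cases h2 : x = p
          · simp [h1, h2]
          · simp [h1, h2, show x < p by omega]
      rw [he, hlt] at h3
      exact h3
    have h4 := h1.trans ((List.Perm.refl _).append h2)
    refine h4.trans ?_
    rw [List.append_assoc]
    exact ((PySem.List.sorted_perm _ (fun x => x) true).append
      ((List.Perm.refl _).append (PySem.List.sorted_perm _ (fun x => x) true))).symm

-- topKSumGo computes acc plus the prefix sum of the descending sort (fuel ≥ length)
theorem topKSumGo_eq_take_sorted_pv : ∀ (fuel : Nat) (l : List Int), l.length ≤ fuel →
    ∀ (kk acc : Int),
    topKSumGo fuel l kk acc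
      = acc + ((PySem.List.sorted l (fun x => x) true).take (min kk (l.length : Int)).toNat).sum := by
  intro fuel
  induction fuel with
  | zero =>
    intro l hl kk acc
    have hnil : l = [] := List.length_eq_zero_iff.mp (by omega)
    subst hnil
    have hs : PySem.List.sorted ([] : List Int) (fun x => x) true = [] := rfl
    simp [topKSumGo, hs]
  | succ fuel ih =>
    intro l hl kk acc
    have hlenS : ∀ (xs : List Int),
        (PySem.List.sorted xs (fun x => x) true).length = xs.length := by
      intro xs; exact PySem.List.length_sorted xs _ _
    rw [topKSumGo]
    by_cases hk0 : kk ≤ 0 ∨ l.length = 0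
    · rw [if_pos hk0]
      rcases hk0 with hk0 | hk0
      · have h0 : (min kk ((l.length : Nat) : Int)).toNat = 0 := by
          have : min kk ((l.length : Nat) : Int) ≤ kk := min_le_left _ _
          omega
        rw [h0, List.take_zero, List.sum_nil, add_zero]
      · have hnil : l = [] := List.length_eq_zero_iff.mp hk0
        subst hnil
        have hs : PySem.List.sorted ([] : List Int) (fun x => x) true = [] := rfl
        simp [hs]
    · rw [if_neg hk0]
      have hkpos : ¬ kk ≤ 0 := fun h => hk0 (Or.inl h)
      have hlen0 : l.length ≠ 0 := fun h => hk0 (Or.inr h)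
      by_cases hkb : ((l.length : Nat) : Int) ≤ kk
      · rw [if_pos hkb]
        have hmin : (min kk ((l.length : Nat) : Int)).toNat
            = (PySem.List.sorted l (fun x => x) true).length := by
          rw [hlenS]; omega
        rw [hmin, List.take_length]
        rw [(PySem.List.sorted_perm l (fun x => x) true).sum_eq]
      · rw [if_neg hkb]
        set p := med3 l with hp
        have hpmem : p ∈ l := med3_mem_pv l (by omega)
        set hi := l.filter (fun x => decide (p < x)) with hhi
        set lo := l.filter (fun x => decide (x < p)) with hlo
        set eqc := PySem.List.count l p with heqc
        have heqc' : eqc = List.count p l := rfl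
        have hsplit := sorted_rev_three_split_pv p l
        rw [show List.count p l = eqc from heqc'.symm] at hsplit
        have hhilt : hi.length < l.length := by
          rw [hhi]
          exact List.length_filter_lt_length_iff_exists.mpr ⟨p, hpmem, by simp⟩
        have hlolt : lo.length < l.length := by
          rw [hlo]
          exact List.length_filter_lt_length_iff_exists.mpr ⟨p, hpmem, by simp⟩
        have hltot : l.length = hi.length + eqc + lo.length := by
          have h := congrArg List.length hsplit
          simp only [List.length_append, List.length_replicate, hlenS] at h
          omega
        have hkt : (min kk ((l.length : Nat) : Int)).toNat = kk.toNat := by omega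
        have hcnt1 : 1 ≤ eqc := by
          rw [heqc']; exact List.count_pos_iff.mpr hpmem
        by_cases hkhi : kk ≤ (hi.length : Int)
        · rw [if_pos hkhi]
          rw [ih hi (by omega) kk acc]
          have hminhi : (min kk (hi.length : Int)).toNat = kk.toNat := by omega
          rw [hminhi, hkt, hsplit, List.append_assoc, List.take_append]
          have h2 : kk.toNat - (PySem.List.sorted hi (fun x => x) true).length = 0 := by
            rw [hlenS]; omega
          rw [h2, List.take_zero, List.append_nil]
        · rw [if_neg hkhi]
          rw [hkt, hsplit, List.append_assoc, List.take_append]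
          have h3 : (PySem.List.sorted hi (fun x => x) true).length ≤ kk.toNat := by
            rw [hlenS]; omega
          rw [List.take_of_length_le h3]
          have h6 : (PySem.List.sorted hi (fun x => x) true).sum = hi.sum :=
            (PySem.List.sorted_perm hi (fun x => x) true).sum_eq
          by_cases hkeq : kk ≤ (hi.length : Int) + eqc
          · rw [if_pos hkeq]
            rw [List.take_append]
            have h7 : kk.toNat - (PySem.List.sorted hi (fun x => x) true).length
                - (List.replicate eqc p).length = 0 := by
              rw [hlenS, List.length_replicate]; omega
            rw [h7, List.take_zero, List.append_nil, List.take_replicate]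
            have h8 : min (kk.toNat - (PySem.List.sorted hi (fun x => x) true).length) eqc
                = kk.toNat - hi.length := by
              rw [hlenS]; omega
            rw [h8, List.sum_append, h6, List.sum_replicate_int]
            have h9 : ((kk.toNat - hi.length : Nat) : Int) = kk - hi.length := by omega
            rw [h9]
            ring
          · rw [if_neg hkeq]
            rw [ih lo (by omega) (kk - hi.length - eqc) _]
            rw [List.take_append]
            rw [List.take_of_length_le (l := List.replicate eqc p)
              (by rw [List.length_replicate, hlenS, ← hhi]; omega)]
            have h10 : (min (kk - (hi.length : Int) - eqc) ((lo.length : Nat) : Int)).toNat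
                = kk.toNat - (PySem.List.sorted hi (fun x => x) true).length
                  - (List.replicate eqc p).length := by
              rw [hlenS, List.length_replicate]; omega
            rw [h10, List.sum_append, List.sum_append, h6, List.sum_replicate_int]
            push_cast
            ring

theorem topKSum_eq_take_sorted_pv (l : List Int) (kk : Int) :
    topKSum l kk
      = ((PySem.List.sorted l (fun x => x) true).take (min kk (l.length : Int)).toNat).sum := by
  rw [topKSum, topKSumGo_eq_take_sorted_pv l.length l le_rfl kk 0, zero_add]

theorem main_pv (c r : List Int) (k : Int) (hpre : c.length ≤ r.length) :
    getMaxRequests c r k = getMaxRequests_alt c r k := by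
  have hlenc : PySem.List.len c = (c.length : Int) := rfl
  have hNnn : (0 : Int) ≤ PySem.List.len c := by rw [hlenc]; positivity
  simp only [getMaxRequests, getMaxRequests_alt]
  rw [PySem.List.foldl_prod_mk
      (f := fun acc i => acc ++ [(min (PySem.List.pyGetD c i 0 * 2) (PySem.List.pyGetD r i 0)
          - min (PySem.List.pyGetD c i 0) (PySem.List.pyGetD r i 0), i)])
      (g := fun acc i => acc ++ [min (PySem.List.pyGetD c i 0) (PySem.List.pyGetD r i 0)])]
  rw [PySem.List.foldl_prod_mk
      (f := fun (acc : Int) (p : Int × Int) => acc + min p.1 p.2)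
      (g := fun (acc : List Int) (p : Int × Int) => acc ++ [min (2 * p.1) p.2 - min p.1 p.2])]
  simp only [PySem.List.foldl_append_singleton_eq_map, List.nil_append]
  rw [PySem.List.foldl_add (g := fun (p : Int × Int) => min p.1 p.2)]
  set gvF : Int → Int := fun i => min (PySem.List.pyGetD c i 0 * 2) (PySem.List.pyGetD r i 0)
      - min (PySem.List.pyGetD c i 0) (PySem.List.pyGetD r i 0) with hgvF
  set nvF : Int → Int := fun i => min (PySem.List.pyGetD c i 0) (PySem.List.pyGetD r i 0) with hnvF
  set pairsA := List.map (fun x => (min (PySem.List.pyGetD c x 0 * 2) (PySem.List.pyGetD r x 0)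
      - min (PySem.List.pyGetD c x 0) (PySem.List.pyGetD r x 0), x))
      (PySem.List.pyRange 0 (PySem.List.len c)) with hpairsA
  set P := PySem.List.sorted2 pairsA (fun p => p.1) (fun p => p.2) true with hP
  -- basic facts about P
  have hperm : P.Perm pairsA := PySem.List.sorted2_perm pairsA _ _ true
  have hlenP : (P.length : Int) = PySem.List.len c := by
    rw [hperm.length_eq, hpairsA, List.length_map, PySem.List.length_pyRange_one]
    omega
  set m : Int := min k (PySem.List.len c) with hm
  -- the selection fold only runs over range(min k n), always taking the add branch
  have hSfold : List.foldl
      (fun s idx => if idx < PySem.List.len c then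
        PySem.Set.add s (PySem.List.pyGetD P idx (0, 0)).2 else s)
      PySem.Set.empty (PySem.List.pyRange 0 k)
      = List.foldl (fun s idx => PySem.Set.add s (PySem.List.pyGetD P idx (0, 0)).2)
          PySem.Set.empty (PySem.List.pyRange 0 m) := by
    by_cases hkn : k ≤ PySem.List.len c
    · rw [hm, min_eq_left hkn]
      apply PySem.List.foldl_congr_mem
      intro s idx hidx
      have h1 := PySem.List.mem_pyRange_one.mp hidx
      rw [if_pos (by omega)]
    · rw [hm, min_eq_right (by omega),
          PySem.List.pyRange_one_append 0 (PySem.List.len c) k hNnn (by omega),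
          List.foldl_append]
      have h2 : ∀ (s : PySem.Set Int), List.foldl
          (fun s idx => if idx < PySem.List.len c then
            PySem.Set.add s (PySem.List.pyGetD P idx (0, 0)).2 else s)
          s (PySem.List.pyRange (PySem.List.len c) k) = s := by
        intro s
        rw [PySem.List.foldl_congr_mem _ _ (fun s _ => s) _ ?_, PySem.List.foldl_ignore]
        intro acc x hx
        have h1 := PySem.List.mem_pyRange_one.mp hx
        rw [if_neg (by omega)]
      rw [h2]
      apply PySem.List.foldl_congr_mem
      intro s idx hidx
      have h1 := PySem.List.mem_pyRange_one.mp hidx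
      rw [if_pos (by omega)]
  -- the selected indices are exactly the second components of the first m sorted pairs
  set TK := List.map Prod.snd (List.take m.toNat P) with hTK
  have hmemS : ∀ i : Int, (List.foldl
      (fun s idx => if idx < PySem.List.len c then
        PySem.Set.add s (PySem.List.pyGetD P idx (0, 0)).2 else s)
      PySem.Set.empty (PySem.List.pyRange 0 k)).contains i = true ↔ i ∈ TK := by
    intro i
    rw [hSfold, PySem.Set.contains_iff]
    have hupd : List.foldl (fun s idx => PySem.Set.add s (PySem.List.pyGetD P idx (0, 0)).2)
        PySem.Set.empty (PySem.List.pyRange 0 m)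
        = PySem.Set.update PySem.Set.empty
            (List.map (fun idx => PySem.List.pyGetD P idx (0, 0)) (PySem.List.pyRange 0 m)
              |>.map Prod.snd) := by
      rw [PySem.Set.update, List.foldl_map, List.foldl_map]
    rw [hupd, PySem.Set.mem_update,
        map_pyRange_pyGetD_take_pv P m (0, 0) (by omega), hTK]
    simp [PySem.Set.empty]
  -- snd components of P are a permutation of range(n), hence TK is nodup and within range
  have hsndP : (P.map Prod.snd).Perm (PySem.List.pyRange 0 (PySem.List.len c)) := by
    refine (hperm.map Prod.snd).trans ?_
    rw [hpairsA, List.map_map]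
    have hid : List.map (Prod.snd ∘ fun x : Int =>
        (min (PySem.List.pyGetD c x 0 * 2) (PySem.List.pyGetD r x 0)
          - min (PySem.List.pyGetD c x 0) (PySem.List.pyGetD r x 0), x))
        (PySem.List.pyRange 0 (PySem.List.len c)) = PySem.List.pyRange 0 (PySem.List.len c) := by
      exact (List.map_congr_left (g := fun a => a) (fun a _ => rfl)).trans (List.map_id' _)
    rw [hid]
  have hTKsub : ∀ x ∈ TK, x ∈ PySem.List.pyRange 0 (PySem.List.len c) := by
    intro x hx
    rw [hTK, List.map_take] at hx
    exact hsndP.mem_iff.mp (List.take_subset _ _ hx)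
  have hTKnodup : TK.Nodup := by
    rw [hTK, List.map_take]
    exact List.Nodup.sublist (List.take_sublist _ _)
      (hsndP.nodup_iff.mpr (PySem.List.nodup_pyRange_one 0 _))
  -- every pair of P carries its own gain as first component
  have hfst : ∀ p ∈ List.take m.toNat P, gvF p.2 = p.1 := by
    intro p hp
    have := hperm.mem_iff.mp (List.take_subset _ _ hp)
    rw [hpairsA, List.mem_map] at this
    obtain ⟨x, _, rfl⟩ := this
    rfl
  -- rewrite the total loop
  rw [PySem.List.foldl_congr_mem _ _
      (fun total i => total + (nvF i + (if i ∈ TK then gvF i else 0))) _ ?_]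
  swap
  · intro acc i _
    dsimp only
    rw [if_congr (hmemS i) rfl rfl]
    by_cases hi : i ∈ TK
    · rw [if_pos hi, if_pos hi, hgvF, hnvF]; ring
    · rw [if_neg hi, if_neg hi, hnvF]; ring
  rw [PySem.List.foldl_add, PySem.List.sum_map_add_int, zero_add]
  -- normal part equals B's total
  have hnorm : (List.map nvF (PySem.List.pyRange 0 (PySem.List.len c))).sum
      = (List.map (fun p => min p.1 p.2) (c.zip r)).sum := by
    rw [hnvF, map_pyRange_eq_map_zip_pv c r (fun a b => min a b) hpre]
  -- gain part equals the top-m prefix sum of B's sorted gains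
  have hG0 : List.map (fun p => min (2 * p.1) p.2 - min p.1 p.2) (c.zip r)
      = List.map gvF (PySem.List.pyRange 0 (PySem.List.len c)) := by
    rw [← map_pyRange_eq_map_zip_pv c r (fun a b => min (2 * a) b - min a b) hpre]
    apply List.map_congr_left
    intro a _
    rw [hgvF]
    simp [mul_comm]
  set sortedG := PySem.List.sorted
      (List.map (fun p => min (2 * p.1) p.2 - min p.1 p.2) (c.zip r)) (fun x => x) true
      with hsortedG
  have hPfst : P.map Prod.fst = sortedG := by
    apply List.Perm.eq_of_pairwise (le := fun a b : Int => b ≤ a)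
    · exact fun a b _ _ h1 h2 => le_antisymm h2 h1
    · -- P.map fst is non-increasing, from the insertBy characterisation of sorted2
      rw [List.pairwise_map]
      have hPW := pairwise_foldl_insertBy_pv
        (before := fun a b : Int × Int =>
          (decide (b.1 < a.1) || (!decide (a.1 < b.1) && decide (b.2 < a.2))))
        (by rintro ⟨a1, a2⟩ ⟨b1, b2⟩ h; simp at *; omega)
        (by rintro ⟨a1, a2⟩ ⟨b1, b2⟩ ⟨c1, c2⟩ h1 h2; simp at *; omega)
        pairsA
      have hunf : P = pairsA.foldl (fun acc x => PySem.List.insertBy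
          (fun a b : Int × Int =>
            (decide (b.1 < a.1) || (!decide (a.1 < b.1) && decide (b.2 < a.2)))) x acc) [] := by
        rw [hP]; rfl
      rw [hunf]
      refine hPW.imp ?_
      rintro ⟨a1, a2⟩ ⟨b1, b2⟩ h
      simp at h
      omega
    · have := PySem.List.sorted_pairwise_rev
        (List.map (fun p => min (2 * p.1) p.2 - min p.1 p.2) (c.zip r)) (fun x => x)
      rw [← hsortedG] at this
      exact this
    · refine ((hperm.map Prod.fst).trans ?_).trans
        (PySem.List.sorted_perm _ (fun x => x) true).symm
      rw [hpairsA, List.map_map, hG0]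
      rfl
  have hgain : (List.map (fun i => if i ∈ TK then gvF i else 0)
      (PySem.List.pyRange 0 (PySem.List.len c))).sum
      = (List.take m.toNat sortedG).sum := by
    rw [sum_map_ite_mem_pv gvF TK (PySem.List.pyRange 0 (PySem.List.len c))
        (PySem.List.nodup_pyRange_one 0 _) hTKnodup hTKsub, hTK, List.map_map,
        List.map_congr_left (f := gvF ∘ Prod.snd) (g := Prod.fst) (fun p hp => hfst p hp),
        List.map_take, hPfst]
  rw [hnorm, hgain]
  -- B's quickselect sum is the same prefix sum of the descending sort
  have hzlen : ((c.zip r).length : Int) = PySem.List.len c := by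
    rw [List.length_zip, hlenc]; omega
  rw [topKSum_eq_take_sorted_pv (List.map (fun p => min (2 * p.1) p.2 - min p.1 p.2) (c.zip r)) k]
  have hmt : (min k ((List.map (fun p => min (2 * p.1) p.2 - min p.1 p.2) (c.zip r)).length
      : Int)).toNat = m.toNat := by
    rw [List.length_map, hm]
    omega
  rw [hmt, ← hsortedG]
  ring

-- ===== VERDICT (by name: the statement is the Claim_ definition above) =====
theorem getMaxRequests_spec : Claim_equal_getMaxRequests := by
  intro serverCapacity incomingRequests k _ hpre
  unfold Pre_getMaxRequests at hpre
  unfold Spec_getMaxRequests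
  exact main_pv serverCapacity incomingRequests k hpre
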